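-- pv_equiv track=rewrite | github.com/nopointt/nospace | development/harkly/branches/feat-cx-osint-pipeline/player_profile_pipeline.py | cluster_reviews_by_keyword
-- ===== SOURCE A (Python) =====
-- def cluster_reviews_by_keyword(reviews: list) -> dict:
--     """
--     Cluster reviews by keyword matching (REQ-008).
--     Returns dict: {cluster_name: [review, ...]}
--     Each review can appear in multiple clusters.
--     Returns top 5 clusters sorted by count descending.
--     """
--     clusters = {
--         'AI & Traffic': ['ai', 'traffic', 'pedestrian', 'npc', 'vehicle'],
--         'Bugs & Crashes': ['crash', 'bug', 'broken', 'freeze', 'error', 'glitch'],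
--         'Physics & Controls': ['physics', 'control', 'handling', 'steering', 'drift'],
--         'Performance': ['fps', 'lag', 'stutter', 'performance', 'optimization'],
--         'Content & Missions': ['content', 'mission', 'quest', 'story', 'boring', 'empty']
--     }
--
--     result = {}
--     for cluster_name, keywords in clusters.items():
--         matched = []
--         for review in reviews:
--             review_text = review.get('review', '').lower()
--             if any(kw in review_text for kw in keywords):
--                 matched.append(review)
--         if matched:
--             result[cluster_name] = matched
--
--     sorted_clusters = sorted(result.items(), key=lambda x: len(x[1]), reverse=True)
--     return dict(sorted_clusters[:5])
-- ===== SOURCE B (Python) =====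
-- def cluster_reviews_by_keyword(reviews: list) -> dict:
--     """Annotate each review once with the indices of the clusters it matches,
--     gather the groups from those annotations, then emit the result by repeated
--     selection of the largest remaining group (first maximum = stable order)."""
--     names = ['AI & Traffic', 'Bugs & Crashes', 'Physics & Controls',
--              'Performance', 'Content & Missions']
--     keyword_table = [
--         ['ai', 'traffic', 'pedestrian', 'npc', 'vehicle'],
--         ['crash', 'bug', 'broken', 'freeze', 'error', 'glitch'],
--         ['physics', 'control', 'handling', 'steering', 'drift'],
--         ['fps', 'lag', 'stutter', 'performance', 'optimization'],
--         ['content', 'mission', 'quest', 'story', 'boring', 'empty'],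
--     ]
--     # pass 1: one lowercase + one keyword match per review, recorded as index tags
--     tagged = []
--     for review in reviews:
--         text = review.get('review', '').lower()
--         tagged.append((review, [i for i in range(5)
--                                 if any(kw in text for kw in keyword_table[i])]))
--     # pass 2: gather each cluster's group from the annotations; drop empty groups
--     groups = [(names[i], [r for r, tags in tagged if i in tags]) for i in range(5)]
--     groups = [g for g in groups if g[1]]
--     # pass 3: top 5 by repeated extraction of the first-largest group
--     out = []
--     while groups and len(out) < 5:
--         best = max(groups, key=lambda g: len(g[1]))
--         groups.remove(best)
--         out.append(best)
--     return dict(out)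
-- ===== Notes on version B (the rewrite author's own statement) =====
-- stated objective: alternative
-- what changed: B replaces A's per-cluster rescans and library sort with a three-stage pipeline: annotate each review once with the indices of the clusters it matches, gather groups from those annotations, and order the groups by repeated first-maximum selection (selection sort) instead of sorted(..., reverse=True).
import Mathlib
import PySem

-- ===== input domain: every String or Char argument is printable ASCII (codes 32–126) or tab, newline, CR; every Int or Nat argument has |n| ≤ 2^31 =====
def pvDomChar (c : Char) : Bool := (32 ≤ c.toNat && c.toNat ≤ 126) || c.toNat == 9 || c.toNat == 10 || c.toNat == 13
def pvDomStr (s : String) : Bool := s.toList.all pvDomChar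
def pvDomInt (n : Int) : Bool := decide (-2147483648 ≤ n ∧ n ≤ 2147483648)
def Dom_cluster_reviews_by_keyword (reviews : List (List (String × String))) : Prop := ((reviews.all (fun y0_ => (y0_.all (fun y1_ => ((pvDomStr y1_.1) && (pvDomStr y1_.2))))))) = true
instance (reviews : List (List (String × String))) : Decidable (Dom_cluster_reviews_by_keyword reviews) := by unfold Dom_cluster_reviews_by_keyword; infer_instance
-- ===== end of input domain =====

-- B annotates each review once with its matching cluster indices, gathers the groups from those
-- annotations, and orders them by repeated first-maximum selection instead of a library sort
-- (alternative decomposition of the same result; not claimed faster).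

-- ===== PORT A =====
-- A: literal table of clusters; for each cluster scan all reviews collecting matches;
-- keep the non-empty clusters; sort by count descending (stable) and take the first 5
-- (the trailing dict(...) is the identity on these distinct-keyed pairs).
def pvClusters : List (String × List String) :=
  [("AI & Traffic", ["ai", "traffic", "pedestrian", "npc", "vehicle"]),
   ("Bugs & Crashes", ["crash", "bug", "broken", "freeze", "error", "glitch"]),
   ("Physics & Controls", ["physics", "control", "handling", "steering", "drift"]),
   ("Performance", ["fps", "lag", "stutter", "performance", "optimization"]),
   ("Content & Missions", ["content", "mission", "quest", "story", "boring", "empty"])]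

def cluster_reviews_by_keyword (reviews : List (List (String × String))) : List (String × List (List (String × String))) :=
  let result := pvClusters.foldl (fun res c =>
    let matched := reviews.foldl (fun m review =>
      let review_text := PySem.Str.lower (PySem.Dict.getD (PySem.Dict.mk review) "review" "")
      if c.2.any (fun kw => PySem.Str.isIn kw review_text) then m ++ [review] else m) []
    if matched ≠ [] then res ++ [(c.1, matched)] else res) []
  (PySem.List.sorted result (fun x => x.2.length) true).take 5

-- ===== PORT B =====
-- Source B's literal tables `names` and `keyword_table`
def pvNames : List String :=
  ["AI & Traffic", "Bugs & Crashes", "Physics & Controls", "Performance", "Content & Missions"]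

def pvKeywordTable : List (List String) :=
  [["ai", "traffic", "pedestrian", "npc", "vehicle"],
   ["crash", "bug", "broken", "freeze", "error", "glitch"],
   ["physics", "control", "handling", "steering", "drift"],
   ["fps", "lag", "stutter", "performance", "optimization"],
   ["content", "mission", "quest", "story", "boring", "empty"]]

-- Source B's pass 3: `while groups and len(out) < 5: best = max(groups, key=...); groups.remove(best); out.append(best)`
-- (n is len(out); list.remove is PySem.List.remove?, which cannot return none here since best ∈ groups)
def pvSelTop (n : Nat) (gs : List (String × List (List (String × String)))) : List (String × List (List (String × String))) :=
  if gs ≠ [] ∧ n < 5 then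
    match PySem.List.max? gs (fun g => g.2.length) with
    | some best =>
      match hr : PySem.List.remove? gs best with
      | some gs' => best :: pvSelTop (n + 1) gs'
      | none => []
    | none => []
  else []
termination_by gs.length
decreasing_by
  have hmem : best ∈ gs := by
    by_contra hab
    rw [(PySem.List.remove?_eq_none_iff gs best).mpr hab] at hr
    simp at hr
  rw [PySem.List.remove?_eq_some_erase gs best hmem] at hr
  have he : gs' = gs.erase best := by simpa using hr.symm
  subst he
  have h1 := List.length_erase_of_mem hmem
  have h2 : 0 < gs.length := List.length_pos_of_mem hmem
  omega

-- B: annotate every review once (pass 1), gather the groups per cluster from the annotations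
-- and drop the empty ones (pass 2), then select the top 5 by repeated first-maximum (pass 3);
-- the final dict(out) is the identity on these distinct-keyed pairs.
def cluster_reviews_by_keyword_alt (reviews : List (List (String × String))) : List (String × List (List (String × String))) :=
  let tagged := reviews.map (fun review =>
    let text := PySem.Str.lower (PySem.Dict.getD (PySem.Dict.mk review) "review" "")
    (review, (PySem.List.pyRange 0 5 1).filter (fun i =>
      (PySem.List.pyGetD pvKeywordTable i []).any (fun kw => PySem.Str.isIn kw text))))
  let groups := (PySem.List.pyRange 0 5 1).map (fun i =>
    (PySem.List.pyGetD pvNames i "",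
     ((tagged.filter (fun rt => rt.2.contains i)).map (fun rt => rt.1))))
  let groups1 := groups.filter (fun g => !g.2.isEmpty)
  pvSelTop 0 groups1

-- ===== PRECONDITION & SPEC =====
def Spec_cluster_reviews_by_keyword (reviews : List (List (String × String))) (out : List (String × List (List (String × String)))) : Prop := out = cluster_reviews_by_keyword_alt reviews
instance (reviews : List (List (String × String))) (out : List (String × List (List (String × String)))) : Decidable (Spec_cluster_reviews_by_keyword reviews out) := by unfold Spec_cluster_reviews_by_keyword; infer_instance

-- ===== CLAIM (what is proved, stated in full; the proofs are below) =====
def Claim_equal_cluster_reviews_by_keyword : Prop := ∀ (reviews : List (List (String × String))), Dom_cluster_reviews_by_keyword reviews → Spec_cluster_reviews_by_keyword reviews (cluster_reviews_by_keyword reviews)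

-- ===== LEMMAS AND PROOFS =====
set_option maxHeartbeats 1000000

theorem pv_max_snoc {α κ : Type} [LinearOrder κ] (key : α → κ) (ys : List α) (x : α) :
    PySem.List.max? (ys ++ [x]) key =
      match PySem.List.max? ys key with
      | none => some x
      | some m => if key m < key x then some x else some m := by
  simp only [PySem.List.max?, List.foldl_append, List.foldl_cons, List.foldl_nil]
  rfl

theorem pv_sorted_rev_snoc {α κ : Type} [LinearOrder κ] (key : α → κ) (ys : List α) (x : α) :
    PySem.List.sorted (ys ++ [x]) key true =
      PySem.List.insertBy (fun a b => decide (key b < key a)) x (PySem.List.sorted ys key true) := by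
  rw [PySem.List.sorted_rev_eq_foldl_insertBy, PySem.List.sorted_rev_eq_foldl_insertBy, List.foldl_append]
  simp

theorem pv_sorted_rev_cons {α κ : Type} [BEq α] [LawfulBEq α] [LinearOrder κ]
    (key : α → κ) (xs : List α) (m : α)
    (h : PySem.List.max? xs key = some m) :
    PySem.List.sorted xs key true = m :: PySem.List.sorted (xs.erase m) key true := by
  induction xs using List.reverseRecOn with
  | nil => simp [PySem.List.max?] at h
  | append_singleton ys x ih =>
    rw [pv_max_snoc] at h
    rw [pv_sorted_rev_snoc]
    cases hys : PySem.List.max? ys key with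
    | none =>
      have hynil := (PySem.List.max?_eq_none_iff ys key).mp hys
      subst hynil
      rw [hys] at h
      simp only [Option.some.injEq] at h
      subst h
      simp [PySem.List.sorted, PySem.List.insertBy]
    | some m' =>
      rw [hys] at h
      simp only [] at h
      have hmax' := PySem.List.max?_isMax hys
      by_cases hlt : key m' < key x
      · rw [if_pos hlt] at h
        have hmx := Option.some.inj h
        subst hmx
        have hnotmem : x ∉ ys := fun hm => absurd (hmax' x hm) (not_le.mpr hlt)
        rw [List.erase_append_right _ hnotmem, List.erase_cons_head, List.append_nil]
        obtain ⟨hd, tl, hS⟩ : ∃ hd tl, PySem.List.sorted ys key true = hd :: tl := by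
          cases hSy : PySem.List.sorted ys key true with
          | nil =>
            exfalso
            have := (PySem.List.sorted_eq_nil_iff ys key true).mp hSy
            subst this
            simp [PySem.List.max?] at hys
          | cons a b => exact ⟨a, b, rfl⟩
        rw [hS]
        have hhda : hd ∈ ys := (PySem.List.mem_sorted ys key true hd).mp (hS ▸ List.mem_cons_self)
        have hhd : key hd < key x := lt_of_le_of_lt (hmax' hd hhda) hlt
        simp [PySem.List.insertBy, hhd]
      · rw [if_neg hlt] at h
        have hmm := Option.some.inj h
        subst hmm
        have hmem := PySem.List.max?_mem hys
        rw [List.erase_append_left _ hmem, pv_sorted_rev_snoc, ih hys]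
        simp [PySem.List.insertBy, not_lt.mpr (le_of_not_gt hlt)]

theorem pv_sel_eq_sorted : ∀ (k : Nat) (gs : List (String × List (List (String × String)))) (n : Nat),
    gs.length ≤ k → n + gs.length ≤ 5 →
    pvSelTop n gs = PySem.List.sorted gs (fun g => g.2.length) true := by
  intro k
  induction k with
  | zero =>
    intro gs n hk _
    have hgs : gs = [] := List.length_eq_zero_iff.mp (Nat.le_zero.mp hk)
    subst hgs
    rw [pvSelTop]
    simp [PySem.List.sorted]
  | succ k ih =>
    intro gs n hk h5
    cases gs with
    | nil => rw [pvSelTop]; simp [PySem.List.sorted]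
    | cons g gs0 =>
      have hne : (g :: gs0) ≠ [] := by simp
      have hn5 : n < 5 := by simp at h5; omega
      rw [pvSelTop]
      cases hm : PySem.List.max? (g :: gs0) (fun g => g.2.length) with
      | none => exact absurd ((PySem.List.max?_eq_none_iff _ _).mp hm) hne
      | some best =>
        have hmem : best ∈ (g :: gs0) := PySem.List.max?_mem hm
        have hrem := PySem.List.remove?_eq_some_erase (g :: gs0) best hmem
        rw [if_pos ⟨hne, hn5⟩]
        split
        · next b hb =>
            have hb' := Option.some.inj hb
            subst hb'
            split
            · next gs' hr =>
                rw [hrem] at hr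
                have hgs' : gs' = (g :: gs0).erase best := (Option.some.inj hr).symm
                subst hgs'
                rw [ih ((g :: gs0).erase best) (n + 1)
                    (by rw [List.length_erase_of_mem hmem]; simp at hk ⊢; omega)
                    (by rw [List.length_erase_of_mem hmem]; simp at h5 ⊢; omega)]
                exact (pv_sorted_rev_cons (fun g => g.2.length) (g :: gs0) best hm).symm
            · next hr => rw [hrem] at hr; simp at hr
        · next hb => simp at hb

theorem pv_select {C R : Type} (g : C → String) (f : C → List R) (cs : List C)
    (acc : List (String × List R)) :
    cs.foldl (fun res c => if f c ≠ [] then res ++ [(g c, f c)] else res) acc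
      = acc ++ (((cs.map (fun c => (c, f c))).filter (fun b => !b.2.isEmpty)).map
          (fun b => (g b.1, b.2))) := by
  induction cs generalizing acc with
  | nil => simp
  | cons c cs ih =>
    rw [List.foldl_cons, ih]
    by_cases h : f c = [] <;> simp [h]

theorem pv_gather {α : Type} (rs : List α) (q : Int → α → Bool) (i : Int)
    (hi : i ∈ ([0, 1, 2, 3, 4] : List Int)) :
    ((rs.map (fun r => (r, ([0, 1, 2, 3, 4] : List Int).filter (fun j => q j r)))).filter
        (fun rt => rt.2.contains i)).map (fun rt => rt.1)
      = rs.filter (fun r => q i r) := by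
  have hc : ∀ r : α, ((([0, 1, 2, 3, 4] : List Int).filter (fun j => q j r)).contains i) = q i r := by
    intro r
    by_cases hq : q i r = true <;> simp [List.mem_filter, hi, hq]
  simp only [List.filter_map, List.map_map, Function.comp_def, hc]
  simp

theorem pv_swap {C R : Type} (l : List (C × List R)) (g : C → String) :
    (l.filter (fun b => !b.2.isEmpty)).map (fun b => (g b.1, b.2))
      = (l.map (fun b => (g b.1, b.2))).filter (fun b => !b.2.isEmpty) := by
  rw [List.filter_map]
  congr 1

theorem pv_top (items : List (String × List (List (String × String)))) (h : items.length ≤ 5) :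
    (PySem.List.sorted items (fun x => x.2.length) true).take 5 = pvSelTop 0 items := by
  rw [pv_sel_eq_sorted 5 items 0 h (by omega)]
  exact List.take_of_length_le (by rw [PySem.List.length_sorted]; exact h)

theorem pv_main (reviews : List (List (String × String))) :
    cluster_reviews_by_keyword reviews = cluster_reviews_by_keyword_alt reviews := by
  unfold cluster_reviews_by_keyword cluster_reviews_by_keyword_alt
  simp only [PySem.List.foldl_append_if (f := fun (review : List (String × String)) => review),
    List.nil_append, List.map_id']
  rw [pv_select (fun c : String × List String => c.1)
      (fun c : String × List String => reviews.filter (fun x =>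
        c.2.any fun kw => PySem.Str.isIn kw (PySem.Str.lower (PySem.Dict.getD (PySem.Dict.mk x) "review" "")))) pvClusters []]
  rw [show PySem.List.pyRange 0 5 1 = [0, 1, 2, 3, 4] from by decide]
  simp only [List.map_cons, List.map_nil]
  rw [pv_gather reviews (fun j r => (PySem.List.pyGetD pvKeywordTable j []).any fun kw =>
        PySem.Str.isIn kw (PySem.Str.lower (PySem.Dict.getD (PySem.Dict.mk r) "review" ""))) 0 (by decide),
      pv_gather reviews (fun j r => (PySem.List.pyGetD pvKeywordTable j []).any fun kw =>
        PySem.Str.isIn kw (PySem.Str.lower (PySem.Dict.getD (PySem.Dict.mk r) "review" ""))) 1 (by decide),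
      pv_gather reviews (fun j r => (PySem.List.pyGetD pvKeywordTable j []).any fun kw =>
        PySem.Str.isIn kw (PySem.Str.lower (PySem.Dict.getD (PySem.Dict.mk r) "review" ""))) 2 (by decide),
      pv_gather reviews (fun j r => (PySem.List.pyGetD pvKeywordTable j []).any fun kw =>
        PySem.Str.isIn kw (PySem.Str.lower (PySem.Dict.getD (PySem.Dict.mk r) "review" ""))) 3 (by decide),
      pv_gather reviews (fun j r => (PySem.List.pyGetD pvKeywordTable j []).any fun kw =>
        PySem.Str.isIn kw (PySem.Str.lower (PySem.Dict.getD (PySem.Dict.mk r) "review" ""))) 4 (by decide)]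
  rw [pv_swap (pvClusters.map (fun c => (c, reviews.filter (fun x =>
        c.2.any fun kw => PySem.Str.isIn kw (PySem.Str.lower (PySem.Dict.getD (PySem.Dict.mk x) "review" ""))))))
      (fun c : String × List String => c.1),
      List.map_map]
  simp only [Function.comp_def]
  rw [show PySem.List.pyGetD pvNames 0 "" = "AI & Traffic" from by decide,
      show PySem.List.pyGetD pvNames 1 "" = "Bugs & Crashes" from by decide,
      show PySem.List.pyGetD pvNames 2 "" = "Physics & Controls" from by decide,
      show PySem.List.pyGetD pvNames 3 "" = "Performance" from by decide,
      show PySem.List.pyGetD pvNames 4 "" = "Content & Missions" from by decide,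
      show PySem.List.pyGetD pvKeywordTable 0 [] = ["ai", "traffic", "pedestrian", "npc", "vehicle"] from by decide,
      show PySem.List.pyGetD pvKeywordTable 1 [] = ["crash", "bug", "broken", "freeze", "error", "glitch"] from by decide,
      show PySem.List.pyGetD pvKeywordTable 2 [] = ["physics", "control", "handling", "steering", "drift"] from by decide,
      show PySem.List.pyGetD pvKeywordTable 3 [] = ["fps", "lag", "stutter", "performance", "optimization"] from by decide,
      show PySem.List.pyGetD pvKeywordTable 4 [] = ["content", "mission", "quest", "story", "boring", "empty"] from by decide]
  simp only [pvClusters, List.map_cons, List.map_nil]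
  exact pv_top _ (le_trans (List.length_filter_le _ _) (by simp))

-- ===== VERDICT (by name: the statement is the Claim_ definition above) =====
theorem cluster_reviews_by_keyword_spec : Claim_equal_cluster_reviews_by_keyword := by
  intro reviews _
  unfold Spec_cluster_reviews_by_keyword
  exact pv_main reviews
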